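-- pv_equiv track=rewrite | github.com/adri-standard/adri | tests/documentation/base_doc_test.py | extract_python_code_blocks
-- ===== SOURCE A (Python) =====
-- from typing import List, Dict, Tuple, Optional
--
-- def extract_python_code_blocks(content: str) -> List[Tuple[str, int]]:
--     """Extract Python code blocks with their line numbers"""
--     code_blocks = []
--     lines = content.split('\n')
--     i = 0
--
--     while i < len(lines):
--         line = lines[i]
--         # Check for code block start
--         if line.strip().startswith('```python') or line.strip() == '```':
--             start_line = i + 1
--             i += 1
--             code_lines = []
--
--             # Collect code until closing ```
--             while i < len(lines) and not lines[i].strip().startswith('```'):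
--                 code_lines.append(lines[i])
--                 i += 1
--
--             if code_lines:
--                 code = '\n'.join(code_lines)
--                 # Only add if it looks like Python code
--                 if any(keyword in code for keyword in ['import', 'from', 'def', 'class', '=', 'print']):
--                     code_blocks.append((code, start_line))
--         i += 1
--
--     return code_blocks
-- ===== SOURCE B (Python) =====
-- def extract_python_code_blocks(content):
--     """Extract Python code blocks with their line numbers"""
--     lines = content.split('\n')
--     # stage 1: index every fence line once
--     fences = [(i, l) for i, l in enumerate(lines) if l.strip().startswith('```')]
--     blocks = []
--     k = 0
--     # stage 2: pair opener fences with the next fence and slice the body out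
--     while k < len(fences):
--         i, l = fences[k]
--         s = l.strip()
--         if not (s.startswith('```python') or s == '```'):
--             k += 1
--             continue
--         if k + 1 < len(fences):
--             end = fences[k + 1][0]
--             k += 2
--         else:
--             end = len(lines)
--             k += 1
--         body = lines[i + 1:end]
--         if body:
--             code = '\n'.join(body)
--             if any(kw in code for kw in ['import', 'from', 'def', 'class', '=', 'print']):
--                 blocks.append((code, i + 1))
--     return blocks
-- ===== Notes on version B (the rewrite author's own statement) =====
-- stated objective: alternative
-- what changed: Two-stage algorithm: first pass indexes all fence lines via a filtered enumerate, then a walk over the fence index pairs opener fences with the next fence and extracts each block body by list slicing, replacing A's line-by-line nested while scan.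
import Mathlib
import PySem

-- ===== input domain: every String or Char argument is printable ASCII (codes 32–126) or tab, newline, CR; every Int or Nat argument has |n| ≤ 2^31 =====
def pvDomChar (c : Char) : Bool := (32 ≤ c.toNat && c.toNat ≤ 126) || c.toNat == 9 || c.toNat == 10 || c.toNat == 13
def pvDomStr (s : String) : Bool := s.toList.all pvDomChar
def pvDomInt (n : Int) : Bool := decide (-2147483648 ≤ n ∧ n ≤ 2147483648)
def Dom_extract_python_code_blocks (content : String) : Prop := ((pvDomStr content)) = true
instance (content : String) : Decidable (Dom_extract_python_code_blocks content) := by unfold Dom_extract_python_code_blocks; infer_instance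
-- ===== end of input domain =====

-- B replaces A's nested line-by-line while scan by a two-stage algorithm:
-- index all fence lines once (filtered enumerate), then pair opener fences
-- with the next fence and slice the body out of the line list (objective: alternative).

-- ===== PORT A =====
-- shared by both ports: line.strip().startswith('```')  /  the opener test
def isFence (l : String) : Bool := PySem.Str.startswith (PySem.Str.strip l) "```"
def isOpener (l : String) : Bool :=
  PySem.Str.startswith (PySem.Str.strip l) "```python" || PySem.Str.strip l == "```"
-- any(keyword in code for keyword in [...])
def pvKw (code : String) : Bool :=
  ["import", "from", "def", "class", "=", "print"].any (fun kw => PySem.Str.isIn kw code)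

-- inner while: collect code lines until a closing ``` (returns collected lines, final index)
def aCollect (lines : List String) (i : Nat) (cl : List String) : List String × Nat :=
  if h : i < lines.length then
    if isFence lines[i] then (cl, i)
    else aCollect lines (i + 1) (cl ++ [lines[i]])
  else (cl, i)
termination_by lines.length - i

theorem aCollect_ge (lines : List String) (i : Nat) (cl : List String) :
    i ≤ (aCollect lines i cl).2 := by
  fun_induction aCollect <;> simp_all
  omega

-- outer while over the line index
def aLoop (lines : List String) (i : Nat) (acc : List (String × Int)) : List (String × Int) :=
  if h : i < lines.length then
    if isOpener lines[i] then
      aLoop lines ((aCollect lines (i + 1) []).2 + 1)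
        (if (aCollect lines (i + 1) []).1.isEmpty then acc
         else if pvKw (PySem.Str.join "\n" (aCollect lines (i + 1) []).1) then
           acc ++ [(PySem.Str.join "\n" (aCollect lines (i + 1) []).1, (i : Int) + 1)]
         else acc)
    else
      aLoop lines (i + 1) acc
  else acc
termination_by lines.length - i
decreasing_by
  · have := aCollect_ge lines (i + 1) []
    omega
  · omega

def extract_python_code_blocks (content : String) : List (String × Int) :=
  aLoop ((PySem.Str.split? content "\n").getD []) 0 []

-- ===== PORT B =====
-- stage 2: walk over the fence index list, pairing openers with the next fence
def bLoop (lines : List String) (fences : List (Int × String)) (acc : List (String × Int)) :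
    List (String × Int) :=
  match fences with
  | [] => acc
  | (i, l) :: rest =>
    if isOpener l then
      let e : Int := match rest with | [] => (lines.length : Int) | (g, _) :: _ => g
      let body := PySem.List.slice lines (some (i + 1)) (some e)
      bLoop lines rest.tail
        (if body.isEmpty then acc
         else if pvKw (PySem.Str.join "\n" body) then
           acc ++ [(PySem.Str.join "\n" body, i + 1)]
         else acc)
    else bLoop lines rest acc
termination_by fences.length
decreasing_by
  all_goals (cases rest <;> simp)

def extract_python_code_blocks_alt (content : String) : List (String × Int) :=
  let lines := (PySem.Str.split? content "\n").getD []
  bLoop lines ((PySem.List.enumerate lines 0).filter (fun p => isFence p.2)) []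

-- ===== PRECONDITION & SPEC =====
def Spec_extract_python_code_blocks (content : String) (out : List (String × Int)) : Prop := out = extract_python_code_blocks_alt content
instance (content : String) (out : List (String × Int)) : Decidable (Spec_extract_python_code_blocks content out) := by unfold Spec_extract_python_code_blocks; infer_instance

-- ===== CLAIM (what is proved, stated in full; the proofs are below) =====
def Claim_equal_extract_python_code_blocks : Prop := ∀ (content : String), Dom_extract_python_code_blocks content → Spec_extract_python_code_blocks content (extract_python_code_blocks content)

-- ===== LEMMAS AND PROOFS =====

-- the fence list of the line suffix starting at i
def F (lines : List String) (i : Nat) : List (Int × String) :=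
  ((PySem.List.enumerate lines 0).drop i).filter (fun p => isFence p.2)

theorem enum_drop_cons (lines : List String) (i : Nat) (h : i < lines.length) :
    (PySem.List.enumerate lines 0).drop i
      = ((i : Int), lines[i]) :: (PySem.List.enumerate lines 0).drop (i + 1) := by
  have hl : i < (PySem.List.enumerate lines 0).length := by
    rw [PySem.List.length_enumerate]; exact h
  rw [List.drop_eq_getElem_cons hl, PySem.List.getElem_enumerate]
  simp

theorem enum_drop_nil (lines : List String) (i : Nat) (h : ¬ i < lines.length) :
    (PySem.List.enumerate lines 0).drop i = [] := by
  apply List.drop_eq_nil_of_le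
  rw [PySem.List.length_enumerate]; omega

theorem F_nil (lines : List String) (i : Nat) (h : ¬ i < lines.length) :
    F lines i = [] := by
  unfold F; rw [enum_drop_nil lines i h]; rfl

theorem F_cons (lines : List String) (i : Nat) (h : i < lines.length)
    (hf : isFence lines[i] = true) :
    F lines i = ((i : Int), lines[i]) :: F lines (i + 1) := by
  unfold F; rw [enum_drop_cons lines i h, List.filter_cons, if_pos (by simpa using hf)]

theorem F_skip (lines : List String) (i : Nat) (h : i < lines.length)
    (hf : isFence lines[i] = false) :
    F lines i = F lines (i + 1) := by
  unfold F; rw [enum_drop_cons lines i h, List.filter_cons, if_neg (by simp [hf])]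

theorem bLoop_nil (lines : List String) (acc : List (String × Int)) :
    bLoop lines [] acc = acc := by
  rw [bLoop.eq_def]

theorem bLoop_cons (lines : List String) (i : Int) (l : String)
    (rest : List (Int × String)) (acc : List (String × Int)) :
    bLoop lines ((i, l) :: rest) acc
      = (if isOpener l then
          bLoop lines rest.tail
            (if (PySem.List.slice lines (some (i + 1))
                  (some (match rest with | [] => (lines.length : Int) | (g, _) :: _ => g))).isEmpty
             then acc
             else if pvKw (PySem.Str.join "\n" (PySem.List.slice lines (some (i + 1))
                  (some (match rest with | [] => (lines.length : Int) | (g, _) :: _ => g)))) then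
               acc ++ [(PySem.Str.join "\n" (PySem.List.slice lines (some (i + 1))
                  (some (match rest with | [] => (lines.length : Int) | (g, _) :: _ => g))), i + 1)]
             else acc)
         else bLoop lines rest acc) := by
  rw [bLoop.eq_def]

-- aCollect characterised by the fence list of the suffix
theorem collect_spec (lines : List String) (n : Nat) :
    ∀ i, lines.length - i ≤ n → i ≤ lines.length → ∀ cd,
    (F lines i = [] → aCollect lines i cd = (cd ++ lines.drop i, lines.length)) ∧
    (∀ g l rest, F lines i = (g, l) :: rest →
       ∃ gn : Nat, g = (gn : Int) ∧ i ≤ gn ∧ gn < lines.length ∧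
         aCollect lines i cd = (cd ++ (lines.drop i).take (gn - i), gn) ∧
         rest = F lines (gn + 1)) := by
  induction n with
  | zero =>
    intro i hn hi cd
    have h : ¬ i < lines.length := by omega
    have hF := F_nil lines i h
    refine ⟨fun _ => ?_, fun g l rest hgl => by rw [hF] at hgl; exact absurd hgl (by simp)⟩
    rw [aCollect, dif_neg h]
    have : i = lines.length := by omega
    subst this
    simp
  | succ m ih =>
    intro i hn hi cd
    by_cases h : i < lines.length
    · cases hf : isFence lines[i] with
      | true =>
        have hF := F_cons lines i h hf
        refine ⟨fun hnil => by rw [hF] at hnil; exact absurd hnil (by simp),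
          fun g l rest hgl => ?_⟩
        rw [hF] at hgl
        have h1 : ((i : Int), lines[i]) = (g, l) := (List.cons.injEq _ _ _ _ ▸ hgl).1
        have h2 : F lines (i + 1) = rest := (List.cons.injEq _ _ _ _ ▸ hgl).2
        have hg : g = (i : Int) := (congrArg Prod.fst h1).symm
        refine ⟨i, hg, le_refl i, h, ?_, h2.symm⟩
        rw [aCollect, dif_pos h, if_pos hf]
        simp
      | false =>
        have hF := F_skip lines i h hf
        have hrec : aCollect lines i cd = aCollect lines (i + 1) (cd ++ [lines[i]]) := by
          rw [aCollect, dif_pos h, hf]; simp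
        have hdrop : lines.drop i = lines[i] :: lines.drop (i + 1) :=
          List.drop_eq_getElem_cons h
        obtain ⟨ih1, ih2⟩ := ih (i + 1) (by omega) (by omega) (cd ++ [lines[i]])
        refine ⟨fun hnil => ?_, fun g l rest hgl => ?_⟩
        · rw [hF] at hnil
          rw [hrec, ih1 hnil, hdrop]
          simp
        · rw [hF] at hgl
          obtain ⟨gn, hg, hge, hlt, heq, hrest⟩ := ih2 g l rest hgl
          refine ⟨gn, hg, by omega, hlt, ?_, hrest⟩
          rw [hrec, heq, hdrop]
          have : gn - i = (gn - (i + 1)) + 1 := by omega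
          rw [this, List.take_succ_cons]
          simp
    · have hF := F_nil lines i h
      refine ⟨fun _ => ?_, fun g l rest hgl => by rw [hF] at hgl; exact absurd hgl (by simp)⟩
      rw [aCollect, dif_neg h]
      have : i = lines.length := by omega
      subst this
      simp

-- A's outer loop equals B's walk over the fence list of the suffix
theorem main_eq (lines : List String) (n : Nat) :
    ∀ i, lines.length - i ≤ n → ∀ acc,
    aLoop lines i acc = bLoop lines (F lines i) acc := by
  induction n with
  | zero =>
    intro i hn acc
    have h : ¬ i < lines.length := by omega
    rw [aLoop, dif_neg h, F_nil lines i h, bLoop_nil]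
  | succ m ih =>
    intro i hn acc
    by_cases h : i < lines.length
    · cases hop : isOpener lines[i] with
      | false =>
        cases hf : isFence lines[i] with
        | true =>
          rw [aLoop, dif_pos h, hop, F_cons lines i h hf, bLoop_cons]
          simp only [hop, Bool.false_eq_true, if_false]
          exact ih (i + 1) (by omega) acc
        | false =>
          rw [aLoop, dif_pos h, hop, F_skip lines i h hf]
          simp only [Bool.false_eq_true, if_false]
          exact ih (i + 1) (by omega) acc
      | true =>
        have hf : isFence lines[i] = true := by
          have hop' := hop
          unfold isOpener at hop'
          rcases Bool.or_eq_true_iff.mp hop' with h1 | h1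
          · unfold isFence
            simp only [PySem.Str.startswith_eq] at h1 ⊢
            rw [PySem.Chars.startswith_iff] at h1 ⊢
            exact List.IsPrefix.trans (by decide) h1
          · unfold isFence
            rw [eq_of_beq h1]
            decide
        rw [aLoop, dif_pos h, hop, F_cons lines i h hf, bLoop_cons]
        simp only [hop, if_true]
        obtain ⟨c1, c2⟩ := collect_spec lines (lines.length - (i + 1)) (i + 1)
          (by omega) (by omega) []
        cases hF1 : F lines (i + 1) with
        | nil =>
          have hc := c1 hF1
          rw [hc]
          have hbody : PySem.List.slice lines (some ((i : Int) + 1)) (some (lines.length : Int))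
              = lines.drop (i + 1) := by
            have := PySem.List.slice_natCast (xs := lines) (a := i + 1) (b := lines.length)
            push_cast at this ⊢
            rw [this]
            exact List.take_of_length_le (by simp)
          simp only [hbody, List.nil_append, List.tail_nil]
          rw [aLoop, dif_neg (by omega), bLoop_nil]
        | cons p rest =>
          obtain ⟨g, l⟩ := p
          obtain ⟨gn, hg, hge, hlt, heq, hrest⟩ := c2 g l rest hF1
          rw [heq]
          subst hg
          have hbody : PySem.List.slice lines (some ((i : Int) + 1)) (some (gn : Int))
              = (lines.drop (i + 1)).take (gn - (i + 1)) := by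
            have := PySem.List.slice_natCast (xs := lines) (a := i + 1) (b := gn)
            push_cast at this ⊢
            rw [this]
          simp only [hbody, List.nil_append, List.tail_cons]
          rw [ih (gn + 1) (by omega), ← hrest]
    · rw [aLoop, dif_neg h, F_nil lines i h, bLoop_nil]

-- ===== VERDICT (by name: the statement is the Claim_ definition above) =====
theorem extract_python_code_blocks_spec : Claim_equal_extract_python_code_blocks := by
  intro content _
  show extract_python_code_blocks content = extract_python_code_blocks_alt content
  unfold extract_python_code_blocks extract_python_code_blocks_alt
  rw [main_eq ((PySem.Str.split? content "\n").getD [])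
      (((PySem.Str.split? content "\n").getD []).length) 0 (by omega) []]
  unfold F
  rw [List.drop_zero]
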